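-- pv_equiv track=rewrite | github.com/nithya-ramakrishnan-biomodeling/mmi-histone-ptm-analysis | ptms_predictions/ptms_utils/visualization/bargraph_plotter.py | create_emphasis_palette
-- ===== SOURCE A (Python) =====
-- from typing import List, Dict, Union, Tuple, Optional
--
-- def create_emphasis_palette(
--     highlight_positions: List[int],
--     n_bars: int,
--     highlight_color: str = "#FF0000",
--     base_color: str = "#E6E6E6",
-- ) -> List[str]:
--     """Create custom emphasis palette
--
--     Args:
--         highlight_positions: Positions to highlight (0-based)
--         n_bars: Total number of bars
--         highlight_color: Color for highlighted bars
--         base_color: Color for non-highlighted bars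
--     """
--     colors = [base_color] * n_bars
--     for pos in highlight_positions:
--         if 0 <= pos < n_bars:
--             colors[pos] = highlight_color
--     return colors
-- ===== SOURCE B (Python) =====
-- def create_emphasis_palette(
--     highlight_positions,
--     n_bars,
--     highlight_color="#FF0000",
--     base_color="#E6E6E6",
-- ):
--     # Sort the distinct in-range highlight positions, then emit the palette as
--     # concatenated segments: a run of base bars up to each mark, then one
--     # highlighted bar; finish with the trailing run of base bars.
--     marks = sorted({p for p in highlight_positions if 0 <= p < n_bars})
--     out = []
--     prev = 0
--     for m in marks:
--         out.extend([base_color] * (m - prev))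
--         out.append(highlight_color)
--         prev = m + 1
--     out.extend([base_color] * (n_bars - prev))
--     return out
-- ===== Notes on version B (the rewrite author's own statement) =====
-- stated objective: alternative
-- what changed: Replaces A's fill-then-patch (allocate a base list, loop over highlight positions mutating entries) by a sort-then-segment construction: the distinct in-range positions are sorted and the palette is emitted as concatenated runs of base color separated by single highlighted bars.
import Mathlib
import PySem

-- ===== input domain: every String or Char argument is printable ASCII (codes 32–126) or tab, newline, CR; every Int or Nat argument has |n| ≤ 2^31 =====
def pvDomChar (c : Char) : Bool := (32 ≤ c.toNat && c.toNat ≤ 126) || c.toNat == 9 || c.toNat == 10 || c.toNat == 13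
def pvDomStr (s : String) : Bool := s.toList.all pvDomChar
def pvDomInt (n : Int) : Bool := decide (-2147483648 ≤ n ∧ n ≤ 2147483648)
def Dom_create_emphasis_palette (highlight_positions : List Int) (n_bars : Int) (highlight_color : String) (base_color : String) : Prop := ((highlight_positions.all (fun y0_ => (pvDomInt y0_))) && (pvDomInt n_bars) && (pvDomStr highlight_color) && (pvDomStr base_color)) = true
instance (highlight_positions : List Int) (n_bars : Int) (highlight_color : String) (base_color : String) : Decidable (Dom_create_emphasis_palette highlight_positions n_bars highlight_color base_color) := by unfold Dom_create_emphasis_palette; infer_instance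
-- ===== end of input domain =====

-- B replaces A's fill-then-patch (mutating loop over highlight positions) by a
-- sort-then-segment construction over the sorted distinct in-range marks (alternative).

-- ===== PORT A =====
-- colors = [base_color] * n_bars; for pos in highlight_positions: if 0 <= pos < n_bars: colors[pos] = highlight_color
def create_emphasis_palette (highlight_positions : List Int) (n_bars : Int) (highlight_color : String) (base_color : String) : List String :=
  let colors := List.replicate n_bars.toNat base_color
  highlight_positions.foldl
    (fun colors pos =>
      if 0 ≤ pos ∧ pos < n_bars then colors.set pos.toNat highlight_color else colors)
    colors

-- ===== PORT B =====
-- the loop 'for m in marks: out.extend([bc]*(m-prev)); out.append(hc); prev = m+1'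
-- plus the trailing 'out.extend([bc]*(n-prev))', as structural recursion on marks
def pvSeg (n : Int) (hc bc : String) : List Int → Int → List String
  | [], prev => List.replicate (n - prev).toNat bc
  | m :: ms, prev => List.replicate (m - prev).toNat bc ++ hc :: pvSeg n hc bc ms (m + 1)

-- marks = sorted({p for p in highlight_positions if 0 <= p < n_bars}); then segment emit
def create_emphasis_palette_alt (highlight_positions : List Int) (n_bars : Int) (highlight_color : String) (base_color : String) : List String :=
  let marks := PySem.List.sorted
    (PySem.Set.ofList (highlight_positions.filter (fun p => decide (0 ≤ p ∧ p < n_bars))))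
    (fun x => x) false
  pvSeg n_bars highlight_color base_color marks 0

-- ===== PRECONDITION & SPEC =====
def Spec_create_emphasis_palette (highlight_positions : List Int) (n_bars : Int) (highlight_color : String) (base_color : String) (out : List String) : Prop := out = create_emphasis_palette_alt highlight_positions n_bars highlight_color base_color
instance (highlight_positions : List Int) (n_bars : Int) (highlight_color : String) (base_color : String) (out : List String) : Decidable (Spec_create_emphasis_palette highlight_positions n_bars highlight_color base_color out) := by unfold Spec_create_emphasis_palette; infer_instance

-- ===== CLAIM (what is proved, stated in full; the proofs are below) =====
def Claim_equal_create_emphasis_palette : Prop := ∀ (highlight_positions : List Int) (n_bars : Int) (highlight_color : String) (base_color : String), Dom_create_emphasis_palette highlight_positions n_bars highlight_color base_color → Spec_create_emphasis_palette highlight_positions n_bars highlight_color base_color (create_emphasis_palette highlight_positions n_bars highlight_color base_color)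

-- ===== LEMMAS AND PROOFS =====

-- A's patching fold preserves the list length.
theorem pvFoldLen (ps : List Int) (n : Int) (hc : String) :
    ∀ (colors : List String),
      (ps.foldl (fun colors pos =>
        if 0 ≤ pos ∧ pos < n then colors.set pos.toNat hc else colors) colors).length
      = colors.length := by
  induction ps with
  | nil => intro colors; rfl
  | cons p ps ih =>
      intro colors
      simp only [List.foldl_cons]
      rw [ih]
      split <;> simp

-- Element i of A's patched list: highlight iff (i : Int) occurs among the positions.
theorem pvFoldGet (n : Int) (hc : String) (ps : List Int) :
    ∀ (colors : List String) (_ : colors.length = n.toNat) (i : Nat) (_ : i < colors.length),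
      (ps.foldl (fun colors pos =>
        if 0 ≤ pos ∧ pos < n then colors.set pos.toNat hc else colors) colors)[i]?
      = if (i : Int) ∈ ps then some hc else colors[i]? := by
  induction ps with
  | nil => intro colors hlen i hi; simp
  | cons p ps ih =>
      intro colors hlen i hi
      simp only [List.foldl_cons]
      by_cases hg : 0 ≤ p ∧ p < n
      · rw [if_pos hg]
        rw [ih (colors.set p.toNat hc) (by simpa using hlen) i (by simpa using hi)]
        by_cases hmem : (i : Int) ∈ ps
        · simp [hmem]
        · by_cases hpi : p = (i : Int)
          · have ht : p.toNat = i := by omega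
            simp [hmem, ht, hi]
            exact fun h => absurd hpi.symm h
          · have hne : p.toNat ≠ i := by omega
            simp [hmem, hne]
            exact fun h => absurd h.symm hpi
      · rw [if_neg hg]
        rw [ih colors hlen i hi]
        have h2 : ¬ (i : Int) = p := fun h => hg (by constructor <;> omega)
        simp [h2]

-- Element prev+j of B's segmented build: highlight iff prev+j is one of the marks.
theorem pvSegGet (n : Int) (hc bc : String) (marks : List Int) :
    ∀ (prev : Int), marks.Pairwise (· < ·) → (∀ m ∈ marks, prev ≤ m ∧ m < n) →
      ∀ (j : Nat),
        (pvSeg n hc bc marks prev)[j]?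
        = if prev + (j : Int) < n then
            some (if prev + (j : Int) ∈ marks then hc else bc)
          else none := by
  induction marks with
  | nil =>
      intro prev _ _ j
      simp only [pvSeg, List.getElem?_replicate, List.not_mem_nil, if_false]
      by_cases h : prev + (j : Int) < n
      · rw [if_pos (by omega : j < (n - prev).toNat), if_pos h]
      · rw [if_neg (by omega : ¬ j < (n - prev).toNat), if_neg h]
  | cons m ms ih =>
      intro prev hpw hb j
      have hpm : prev ≤ m ∧ m < n := hb m List.mem_cons_self
      have hms : ∀ x ∈ ms, m < x := by
        intro x hx; exact (List.pairwise_cons.mp hpw).1 x hx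
      have hk : ((m - prev).toNat : Int) = m - prev := by omega
      simp only [pvSeg]
      by_cases hjk : j < (m - prev).toNat
      · rw [List.getElem?_append_left (by simpa using hjk)]
        have hnotm : prev + (j : Int) ∉ m :: ms := by
          intro hmem
          rcases List.mem_cons.mp hmem with h | h
          · omega
          · have := hms _ h; omega
        rw [List.getElem?_replicate, if_pos hjk,
            if_pos (by omega : prev + (j : Int) < n), if_neg hnotm]
      · rw [List.getElem?_append_right (by simp only [List.length_replicate]; omega)]
        simp only [List.length_replicate]
        by_cases hje : j = (m - prev).toNat
        · have h0 : j - (m - prev).toNat = 0 := by omega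
          rw [h0]
          simp only [List.getElem?_cons_zero]
          have hmmem : prev + (j : Int) ∈ m :: ms := by
            have : prev + (j : Int) = m := by omega
            rw [this]; exact List.mem_cons_self
          rw [if_pos (by omega : prev + (j : Int) < n), if_pos hmmem]
        · have hidx : j - (m - prev).toNat = (j - (m - prev).toNat - 1) + 1 := by omega
          rw [hidx]
          simp only [List.getElem?_cons_succ]
          rw [ih (m + 1) (List.pairwise_cons.mp hpw).2
              (fun x hx => ⟨by have := hms x hx; omega, (hb x (List.mem_cons_of_mem _ hx)).2⟩)]
          have harith : m + 1 + ((j - (m - prev).toNat - 1 : Nat) : Int) = prev + (j : Int) := by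
            omega
          rw [harith]
          have hne : prev + (j : Int) ≠ m := by omega
          by_cases hfin : prev + (j : Int) < n
          · rw [if_pos hfin, if_pos hfin]
            congr 1
            simp [List.mem_cons, hne]
          · rw [if_neg hfin, if_neg hfin]

-- ===== VERDICT (by name: the statement is the Claim_ definition above) =====
theorem create_emphasis_palette_spec : Claim_equal_create_emphasis_palette := by
  intro ps n hc bc _
  unfold Spec_create_emphasis_palette create_emphasis_palette create_emphasis_palette_alt
  set fl := ps.filter (fun p => decide (0 ≤ p ∧ p < n)) with hfl
  set marks := PySem.List.sorted (PySem.Set.ofList fl) (fun x => x) false with hmk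
  have hpw : marks.Pairwise (· < ·) := PySem.List.sorted_ofList_pairwise_lt fl
  have hmem : ∀ x : Int, x ∈ marks ↔ (x ∈ ps ∧ 0 ≤ x ∧ x < n) := by
    intro x
    rw [hmk, PySem.List.mem_sorted, PySem.Set.mem_ofList, hfl, List.mem_filter]
    simp
  have hb : ∀ m ∈ marks, (0 : Int) ≤ m ∧ m < n := by
    intro m hm; exact ((hmem m).mp hm).2
  apply List.ext_getElem?
  intro i
  rw [pvSegGet n hc bc marks 0 hpw hb i]
  simp only [zero_add]
  by_cases hir : i < n.toNat
  · have hlen : (List.replicate n.toNat bc).length = n.toNat := by simp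
    rw [pvFoldGet n hc ps (List.replicate n.toNat bc) hlen i (by simpa using hir)]
    rw [if_pos (by omega : (i : Int) < n)]
    by_cases hm : (i : Int) ∈ ps
    · have hin : (i : Int) ∈ marks := (hmem _).mpr ⟨hm, by omega, by omega⟩
      rw [if_pos hm, if_pos hin]
    · have hout : (i : Int) ∉ marks := fun h => hm ((hmem _).mp h).1
      rw [if_neg hm, if_neg hout, List.getElem?_replicate, if_pos hir]
  · rw [if_neg (by omega : ¬ (i : Int) < n), List.getElem?_eq_none]
    rw [pvFoldLen]; simp; omega
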